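-- pv_equiv track=rewrite | github.com/miliar/Code_Jam_Webscraper | solutions_python/Problem_178/2596.py | flipPancake
-- ===== SOURCE A (Python) =====
-- def flipPancake(top):
--     for i in range(len(top)):
--         if top[i] == '-':
--             top[i] = '+'
--         else:
--             top[i] = '-'
--
--     top.reverse()
--     return top
-- ===== SOURCE B (Python) =====
-- def flipPancake(top):
--     # Single two-pointer pass: flip-and-swap from both ends in place
--     # (mutates and returns the same list object, like A).
--     n = len(top)
--     for i in range((n + 1) // 2):
--         j = n - 1 - i
--         a = '+' if top[i] == '-' else '-'
--         b = '+' if top[j] == '-' else '-'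
--         top[i] = b
--         top[j] = a
--     return top
-- ===== Notes on version B (the rewrite author's own statement) =====
-- stated objective: alternative
-- what changed: Replaces A's flip-every-element pass followed by list.reverse() with a single in-place two-pointer loop that flips and swaps the ends simultaneously (the odd middle element is flipped once).
import Mathlib
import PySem

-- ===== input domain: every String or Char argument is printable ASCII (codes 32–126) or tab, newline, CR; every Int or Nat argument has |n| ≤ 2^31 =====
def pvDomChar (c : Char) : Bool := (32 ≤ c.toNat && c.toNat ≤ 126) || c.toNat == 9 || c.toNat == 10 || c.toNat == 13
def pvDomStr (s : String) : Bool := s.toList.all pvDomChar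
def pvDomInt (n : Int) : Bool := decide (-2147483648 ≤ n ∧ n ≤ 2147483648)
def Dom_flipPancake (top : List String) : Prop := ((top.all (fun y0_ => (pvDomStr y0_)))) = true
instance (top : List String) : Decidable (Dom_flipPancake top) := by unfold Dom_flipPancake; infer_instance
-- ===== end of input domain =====

-- B replaces A's flip-every-element pass plus list.reverse() with a single in-place
-- two-pointer flip-and-swap loop (objective: alternative; return value proved equal;
-- both Pythons mutate the argument list in place identically: same final contents).


-- ===== PORT A =====
-- `if top[i] == '-': top[i] = '+' else: top[i] = '-'`
def aFlip (s : String) : String := if s = "-" then "+" else "-"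

-- A: flip every element in order (the index loop rewriting each top[i]), then reverse.
def flipPancake (top : List String) : List String :=
  (top.map aFlip).reverse

-- ===== PORT B =====
def bFlip (s : String) : String := if s = "-" then "+" else "-"

-- one iteration of B's loop body: read both ends, write the flipped values crosswise
-- (indices i and n-1-i are always in range when the loop runs, so getD is exact)
def bStep (n : Nat) (xs : List String) (i : Nat) : List String :=
  let j := n - 1 - i
  let a := bFlip (xs.getD i "")
  let b := bFlip (xs.getD j "")
  (xs.set i b).set j a

def bLoop (n h : Nat) (xs : List String) (i : Nat) : List String :=
  if i < h then bLoop n h (bStep n xs i) (i + 1) else xs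
termination_by h - i

def flipPancake_alt (top : List String) : List String :=
  bLoop top.length ((top.length + 1) / 2) top 0

-- ===== PRECONDITION & SPEC =====
def Spec_flipPancake (top : List String) (out : List String) : Prop := out = flipPancake_alt top
instance (top : List String) (out : List String) : Decidable (Spec_flipPancake top out) := by unfold Spec_flipPancake; infer_instance

-- ===== CLAIM (what is proved, stated in full; the proofs are below) =====
def Claim_equal_flipPancake : Prop := ∀ (top : List String), Dom_flipPancake top → Spec_flipPancake top (flipPancake top)

-- ===== LEMMAS AND PROOFS =====

theorem bStep_length (n : Nat) (xs : List String) (i : Nat) :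
    (bStep n xs i).length = xs.length := by
  simp [bStep]

-- target value at each position
theorem target_getElem? (top : List String) (m : Nat) (hm : m < top.length) :
    ((top.map bFlip).reverse)[m]? = (top[top.length - 1 - m]?).map bFlip := by
  have h : m < (top.map bFlip).length := by simpa using hm
  rw [List.getElem?_reverse h]
  simp [List.getElem?_map]

-- loop invariant: positions m < i or m ≥ n - i already hold the final value,
-- the rest still hold the original value
theorem bLoop_inv (top : List String) (d i : Nat) (xs : List String)
    (hd : (top.length + 1) / 2 - i = d)
    (hlen : xs.length = top.length)
    (hinv : ∀ m : Nat, xs[m]? =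
      if m < i ∨ top.length - i ≤ m then ((top.map bFlip).reverse)[m]? else top[m]?) :
    bLoop top.length ((top.length + 1) / 2) xs i = (top.map bFlip).reverse := by
  induction d generalizing xs i with
  | zero =>
    have hi : ¬ i < (top.length + 1) / 2 := by omega
    rw [bLoop, if_neg hi]
    refine List.ext_getElem? (fun m => ?_)
    rw [hinv m]
    by_cases hm : m < top.length
    · have : m < i ∨ top.length - i ≤ m := by omega
      rw [if_pos this]
    · have h1 : xs[m]? = none := by rw [List.getElem?_eq_none]; omega
      have h2 : ((top.map bFlip).reverse)[m]? = none := by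
        rw [List.getElem?_eq_none]; simp; omega
      have h3 : (top[m]? : Option String) = none := by rw [List.getElem?_eq_none]; omega
      split
      · rfl
      · rw [h3, h2]
  | succ d ih =>
    have hi : i < (top.length + 1) / 2 := by omega
    rw [bLoop, if_pos hi]
    set n := top.length with hn
    have hin : i < n := by omega
    have hji : i ≤ n - 1 - i := by omega
    have hjn : n - 1 - i < n := by omega
    -- values read by the step are the original ones
    have hxi : xs[i]? = top[i]? := by
      rw [hinv i, if_neg]; omega
    have hxj : xs[n - 1 - i]? = top[n - 1 - i]? := by
      rw [hinv (n - 1 - i), if_neg]; omega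
    apply ih (i + 1) _ (by omega)
    · rw [bStep_length, hlen]
    · intro m
      show ((xs.set i (bFlip (xs.getD (n - 1 - i) ""))).set (n - 1 - i)
              (bFlip (xs.getD i "")))[m]? = _
      rw [List.getElem?_set, List.getElem?_set]
      by_cases hmj : n - 1 - i = m
      · subst hmj
        rw [if_pos rfl, if_pos (by simp [hlen]; omega)]
        have hcond : n - 1 - i < i + 1 ∨ n - (i + 1) ≤ n - 1 - i := by omega
        rw [if_pos hcond, target_getElem? top _ (by omega)]
        have : n - 1 - (n - 1 - i) = i := by omega
        rw [this]
        have hv : top[i]? = some top[i] := List.getElem?_eq_getElem hin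
        rw [List.getD_eq_getElem?_getD, hxi, hv]
        simp
      · rw [if_neg hmj]
        by_cases hmi : i = m
        · subst hmi
          rw [if_pos rfl, if_pos (by simp [hlen]; omega)]
          rw [if_pos (by omega), target_getElem? top _ (by omega)]
          have hv : top[n - 1 - i]? = some top[n - 1 - i] := List.getElem?_eq_getElem hjn
          rw [List.getD_eq_getElem?_getD, hxj, hv]
          simp
        · rw [if_neg hmi, hinv m]
          by_cases hc : m < i ∨ n - i ≤ m
          · rw [if_pos hc, if_pos (by omega)]
          · rw [if_neg hc, if_neg (by omega)]

-- ===== VERDICT (by name: the statement is the Claim_ definition above) =====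
theorem flipPancake_spec : Claim_equal_flipPancake := by
  intro top _
  show flipPancake top = flipPancake_alt top
  rw [flipPancake, flipPancake_alt]
  have : aFlip = bFlip := rfl
  rw [this]
  exact (bLoop_inv top ((top.length + 1) / 2) 0 top rfl rfl (fun m => by
    by_cases hm : m < top.length
    · rw [if_neg (by omega)]
    · have h2 : ((top.map bFlip).reverse)[m]? = none := by
        rw [List.getElem?_eq_none]; simp; omega
      have h3 : (top[m]? : Option String) = none := by rw [List.getElem?_eq_none]; omega
      rw [h3]; split
      · rw [h2]
      · rfl)).symm
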